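-- pv_equiv track=rewrite | github.com/tagword/codeagent | codeagent/server/__init__.py | _webui_transcript_partition_user_blocks
-- ===== SOURCE A (Python) =====
-- from typing import TYPE_CHECKING, Any
--
-- def _webui_transcript_partition_user_blocks(rows: list[dict[str, Any]]) -> list[list[dict[str, Any]]]:
--     """Each block starts at a user message; following assistant rows attach until the next user."""
--     blocks: list[list[dict[str, Any]]] = []
--     cur: list[dict[str, Any]] = []
--     for row in rows:
--         if row.get("role") == "user":
--             if cur:
--                 blocks.append(cur)
--             cur = [row]
--         else:
--             if not cur:
--                 cur = [row]
--             else: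
--                 cur.append(row)
--     if cur:
--         blocks.append(cur)
--     return blocks
-- ===== SOURCE B (Python) =====
-- def _webui_transcript_partition_user_blocks(rows):
--     """Back-to-front: scan reversed rows, closing a block at each user message."""
--     blocks = []
--     cur = []
--     for row in reversed(rows):
--         if row.get("role") == "user":
--             blocks.append([row] + cur)
--             cur = []
--         else:
--             cur = [row] + cur
--     if cur:
--         blocks.append(cur)
--     blocks.reverse()
--     return blocks
-- ===== Notes on version B (the rewrite author's own statement) =====
-- stated objective: alternative
-- what changed: B scans the rows in reverse, closing a complete block at each user message and building the block list back-to-front, instead of A's forward pass with a running partial-block accumulator and deferred final flush.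
import Mathlib
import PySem

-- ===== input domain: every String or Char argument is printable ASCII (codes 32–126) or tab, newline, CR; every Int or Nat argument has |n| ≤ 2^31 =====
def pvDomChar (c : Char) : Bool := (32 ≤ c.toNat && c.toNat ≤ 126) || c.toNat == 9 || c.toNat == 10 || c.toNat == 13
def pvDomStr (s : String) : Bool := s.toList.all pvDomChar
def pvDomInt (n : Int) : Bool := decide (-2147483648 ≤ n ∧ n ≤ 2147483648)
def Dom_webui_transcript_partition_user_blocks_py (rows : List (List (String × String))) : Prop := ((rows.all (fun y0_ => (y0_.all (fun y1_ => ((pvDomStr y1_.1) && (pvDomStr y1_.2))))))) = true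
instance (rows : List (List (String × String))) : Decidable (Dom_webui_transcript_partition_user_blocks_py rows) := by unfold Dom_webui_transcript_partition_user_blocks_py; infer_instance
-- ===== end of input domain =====

-- B builds the block list back-to-front by a reverse scan (closing a block at each user
-- message) instead of A's forward pass with a running accumulator; same cost, different shape.

-- ===== PORT A =====
-- row.get("role") == "user"
def pvIsUser (row : List (String × String)) : Bool :=
  (PySem.Dict.mk row).get? "role" == some "user"

-- A's for-loop over rows with state (blocks, cur), plus the final flush of cur
def pvGoA : List (List (String × String)) → List (List (List (String × String))) →
    List (List (String × String)) → List (List (List (String × String)))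
  | [], blocks, cur => if cur.isEmpty then blocks else blocks ++ [cur]
  | r :: rs, blocks, cur =>
    if pvIsUser r then
      pvGoA rs (if cur.isEmpty then blocks else blocks ++ [cur]) [r]
    else
      pvGoA rs blocks (if cur.isEmpty then [r] else cur ++ [r])

def webui_transcript_partition_user_blocks_py (rows : List (List (String × String))) :
    List (List (List (String × String))) :=
  pvGoA rows [] []

-- ===== PORT B =====
-- one step of B's loop over reversed(rows): close a block at a user row, else grow cur at the front
def pvStepB (st : List (List (List (String × String))) × List (List (String × String)))
    (row : List (String × String)) :
    List (List (List (String × String))) × List (List (String × String)) :=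
  if pvIsUser row then (st.1 ++ [row :: st.2], []) else (st.1, row :: st.2)

def webui_transcript_partition_user_blocks_py_alt (rows : List (List (String × String))) :
    List (List (List (String × String))) :=
  let st := rows.reverse.foldl pvStepB ([], [])
  let blocks := if st.2.isEmpty then st.1 else st.1 ++ [st.2]
  blocks.reverse

-- ===== PRECONDITION & SPEC =====
def Spec_webui_transcript_partition_user_blocks_py (rows : List (List (String × String))) (out : List (List (List (String × String)))) : Prop := out = webui_transcript_partition_user_blocks_py_alt rows
instance (rows : List (List (String × String))) (out : List (List (List (String × String)))) : Decidable (Spec_webui_transcript_partition_user_blocks_py rows out) := by unfold Spec_webui_transcript_partition_user_blocks_py; infer_instance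

-- ===== CLAIM (what is proved, stated in full; the proofs are below) =====
def Claim_equal_webui_transcript_partition_user_blocks_py : Prop := ∀ (rows : List (List (String × String))), Dom_webui_transcript_partition_user_blocks_py rows → Spec_webui_transcript_partition_user_blocks_py rows (webui_transcript_partition_user_blocks_py rows)

-- ===== LEMMAS AND PROOFS =====

-- does a block start with a user row?
def pvHeadUser : List (List (String × String)) → Bool
  | [] => false
  | h :: _ => pvIsUser h

-- reference partition: each row attaches to the following block unless that block starts with a user
def pvPart : List (List (String × String)) → List (List (List (String × String)))
  | [] => []
  | r :: rs =>
    match pvPart rs with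
    | [] => [[r]]
    | b :: bs => if pvHeadUser b then [r] :: b :: bs else (r :: b) :: bs

theorem pvPart_cons_head (r : List (String × String)) (rs : List (List (String × String))) :
    ∃ t bs, pvPart (r :: rs) = (r :: t) :: bs := by
  simp only [pvPart]
  cases pvPart rs with
  | nil => exact ⟨[], [], rfl⟩
  | cons b bs =>
    by_cases h : pvHeadUser b = true
    · simp [h]
    · simp [h]

-- A's accumulator semantics: cur merges into the front of the partition of the rest
def pvF (cur : List (List (String × String))) (rows : List (List (String × String))) :
    List (List (List (String × String))) :=
  if cur.isEmpty then pvPart rows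
  else
    match pvPart rows with
    | [] => [cur]
    | b :: bs => if pvHeadUser b then cur :: b :: bs else (cur ++ b) :: bs

theorem pvF_single (r : List (String × String)) (rs : List (List (String × String))) :
    pvF [r] rs = pvPart (r :: rs) := by
  simp only [pvF, pvPart, List.isEmpty]
  cases pvPart rs with
  | nil => rfl
  | cons b bs =>
    by_cases h : pvHeadUser b = true <;> simp [h]

theorem pvGoA_eq (rows : List (List (String × String))) :
    ∀ blocks cur, pvGoA rows blocks cur = blocks ++ pvF cur rows := by
  induction rows with
  | nil =>
    intro blocks cur
    cases cur <;> simp [pvGoA, pvF, pvPart]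
  | cons r rs ih =>
    intro blocks cur
    by_cases hu : pvIsUser r = true
    · simp only [pvGoA, hu, if_pos]
      rw [ih, pvF_single]
      cases cur with
      | nil => simp [pvF, List.isEmpty]
      | cons c cs =>
        obtain ⟨t, bs, hp⟩ := pvPart_cons_head r rs
        simp [pvF, hp, pvHeadUser, hu, List.isEmpty]
    · simp only [pvGoA, hu, if_neg, Bool.not_eq_true]
      rw [ih]
      cases cur with
      | nil =>
        simp only [List.isEmpty, if_pos]
        rw [pvF_single]
        simp [pvF, List.isEmpty]
      | cons c cs =>
        simp only [List.isEmpty]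
        congr 1
        simp only [pvF, List.isEmpty, pvPart]
        cases h : pvPart rs with
        | nil => simp [pvHeadUser, hu]
        | cons b bs =>
          by_cases hb : pvHeadUser b = true
          · simp only [hb, if_pos, if_true]
            simp [pvHeadUser, hu]
          · simp only [hb, if_neg, Bool.not_eq_true, if_false]
            simp [pvHeadUser, hu, hb]

theorem pvA_eq_part (rows : List (List (String × String))) :
    webui_transcript_partition_user_blocks_py rows = pvPart rows := by
  unfold webui_transcript_partition_user_blocks_py
  rw [pvGoA_eq]
  simp [pvF, List.isEmpty]

-- B's fold, written as a foldr (= foldl over the reversed list)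
def pvFoldB (rows : List (List (String × String))) :
    List (List (List (String × String))) × List (List (String × String)) :=
  rows.foldr (fun r st => pvStepB st r) ([], [])

theorem pvFoldB_spec (rows : List (List (String × String))) :
    pvPart rows =
      (if (pvFoldB rows).2.isEmpty then (pvFoldB rows).1
       else (pvFoldB rows).1 ++ [(pvFoldB rows).2]).reverse ∧
    (∀ b ∈ (pvFoldB rows).1, pvHeadUser b = true) ∧
    pvHeadUser (pvFoldB rows).2 = false := by
  induction rows with
  | nil => simp [pvFoldB, pvPart, pvHeadUser]
  | cons r rs ih =>
    obtain ⟨h1, h2, h3⟩ := ih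
    have hstep : pvFoldB (r :: rs) = pvStepB (pvFoldB rs) r := rfl
    by_cases hu : pvIsUser r = true
    · -- user row: close the current block
      rw [hstep]
      simp only [pvStepB, hu, if_pos]
      refine ⟨?_, ?_, by simp [pvHeadUser]⟩
      · cases hc : (pvFoldB rs).2 with
        | nil =>
          rw [hc] at h1; simp only [List.isEmpty] at h1
          simp only [pvPart, h1, hc, List.isEmpty, List.reverse_append]
          cases hq : (pvFoldB rs).1.reverse with
          | nil => simp [hq]
          | cons b bs =>
            have hb : b ∈ (pvFoldB rs).1 := by
              have : b ∈ (pvFoldB rs).1.reverse := by rw [hq]; exact List.mem_cons_self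
              simpa using this
            simp [h2 b hb, hq]
        | cons c cs =>
          rw [hc] at h1 h3; simp only [List.isEmpty] at h1
          simp only [pvPart, h1, pvHeadUser] at *
          simp [pvPart, h1, h3, hc, List.isEmpty, pvHeadUser]
      · intro b hb
        rcases List.mem_append.mp hb with h | h
        · exact h2 b h
        · simp only [List.mem_singleton] at h
          subst h; simp [pvHeadUser, hu]
    · -- non-user row: grow the current block at the front
      rw [hstep]
      simp only [pvStepB, hu, if_neg, Bool.not_eq_true]
      refine ⟨?_, h2, by simp [pvHeadUser, hu]⟩
      cases hc : (pvFoldB rs).2 with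
      | nil =>
        rw [hc] at h1; simp only [List.isEmpty] at h1
        simp only [pvPart, h1, List.isEmpty]
        cases hq : (pvFoldB rs).1.reverse with
        | nil => simp [hq]
        | cons b bs =>
          have hb : b ∈ (pvFoldB rs).1 := by
            have : b ∈ (pvFoldB rs).1.reverse := by rw [hq]; exact List.mem_cons_self
            simpa using this
          simp [h2 b hb, hq]
      | cons c cs =>
        rw [hc] at h1 h3
        simp only [List.isEmpty] at h1
        simp [pvPart, h1, h3, List.isEmpty]

theorem pvB_eq_part (rows : List (List (String × String))) :
    webui_transcript_partition_user_blocks_py_alt rows = pvPart rows := by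
  unfold webui_transcript_partition_user_blocks_py_alt
  have hf : rows.reverse.foldl pvStepB ([], []) = pvFoldB rows := by
    rw [List.foldl_reverse]; rfl
  rw [hf, (pvFoldB_spec rows).1]

-- ===== VERDICT (by name: the statement is the Claim_ definition above) =====
theorem webui_transcript_partition_user_blocks_py_spec : Claim_equal_webui_transcript_partition_user_blocks_py := by
  intro rows _
  unfold Spec_webui_transcript_partition_user_blocks_py
  rw [pvA_eq_part, pvB_eq_part]
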